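/- GENERATED by mk_final_copies.py from the proof of the farm's unit `start_decoder.9c` (farm:start_decoder.9c.1: Proof.lean) as the
   re-elaboration sweep compiled it — do not edit. -/
import Asan.CheckWalk
import Vorbis.Spec.Units.start_decoder_9c

/-!
  Unit `start_decoder.9c`: a child of the split of segment `.9` of start_decoder (Vorbis/Spec/StartDecoder9.lean: the cut assertion
  `In9`, the claims, `Seg9.of_parts`). The walk is the farm worker's (unit start_decoder.9, attempt 1) over the carry layer of
  Vorbis/Spec/StartDecoder1.lean (`P1.sd2_carry`, `P1.frame_carry`, `P1.layout_facts`, `P1.wmax_ok`) and the exit lemmas of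
  `Vorbis.Spec.StartDecoder.S9` (`mid_exit`, `err_exit`, `err4_exit`).
-/

open X86 X86.User Asan Vorbis Vorbis.Spec Vorbis.Spec.StartDecoder Vorbis.Spec.StartDecoder.P1 Vorbis.Spec.StartDecoder.S9

set_option maxRecDepth 4000
set_option maxHeartbeats 4000000

namespace Vorbis.Spec.start_decoder_9c

/-- **Segment `.9`, part c: ONE ROUND of loop 3737** (head 0x1141f7 = `cut76`; `header[i] = get8_packet(f)` with the store check
0x1141e6 inside the frame object `header`) back to the head with `i + 1` (the measure `6 - i` decreases), or — `i = 6` — the exit through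
`vorbis_validate(header)` to `cut77` = 0x11420a. The loop itself is the induction `seg9c_all` of Proof.lean. -/
theorem seg9c (Lay : Layout) (hLay : Lay.hi = 0x1000000) (μ : Microarch) (hμ : UserX.MicroOK μ) (u₀ : State)
    (hcode : HasCodeNat Lay u₀ Vorbis.L.start_decoder.entry Vorbis.Code.code_start_decoder.nat Vorbis.L.start_decoder.size)
    (h_g8 : ∀ (others : List Obj) (frames : List (Nat × FrameLayout)) (Blk : Block → Prop) (len : Nat),
      Calls Lay μ Vorbis.WayInv (Vorbis.conv u₀) Vorbis.L.get8_packet.entry (Vorbis.Spec.get8_packet.spec others frames Blk len))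
    (h_st1 : Asan.SmallCheck Lay μ Vorbis.WayInv (Vorbis.CodeOK u₀) [.rax, .rdx] 1 Vorbis.L.__asan_store1_noabort.entry)
    (h_vv : ∀ (others : List Obj) (frames : List (Nat × FrameLayout)),
      Calls Lay μ Vorbis.WayInv (Vorbis.conv u₀) Vorbis.L.vorbis_validate.entry (Vorbis.Spec.vorbis_validate.spec others frames))
    (g : Ghost) (A : Arena × List Obj) (v : State) (i : Nat) (hb : In9 u₀ g Vorbis.L.start_decoder.cut76 A v)
    (hi : i ≤ 6) (hr13 : v.reg .r13 = UInt64.ofNat i) :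
    ReachVia Lay μ WayInv v (fun w =>
      (∃ A j, In9 u₀ g Vorbis.L.start_decoder.cut76 A w ∧ j ≤ 6 ∧ w.reg .r13 = UInt64.ofNat j ∧ 6 - j < 6 - i) ∨
      (∃ A, In9 u₀ g Vorbis.L.start_decoder.cut77 A w)) := by
  have he := hb.frame.entry
  v_entry he
  simp only [depth] at he_room he_stack
  have hlay := layout_facts hb.frame hb.hand hb.sd
  have eRA : g.RA = (g.e.reg .rsp).toNat := rfl
  have ef : g.f = (g.e.reg .rdi).toNat := rfl
  rw [eRA, ef] at hlay
  obtain ⟨hRA, hR8, _, _, hfstack, hflo, hfhi, hflog, hfcrc, hfout, hAstack, hAcrc, hAhi, hAlo⟩ := hlay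
  have w_rip := hb.frame.rip
  have w_rsp : v.reg .rsp = g.e.reg .rsp - 1480 := by
    rw [hb.frame.rsp]
    apply UInt64.toNat_inj.mp
    rw [toNat_addr _ (by omega)]
    u_omega
  have w_rbp : v.reg .rbp = g.e.reg .rdi := by
    rw [hb.rbp]
    exact addr_toNat _
  have hRw : g.e.reg .rsp - 1480 = addr g.R := by
    rw [← w_rsp]
    exact hb.frame.rsp
  have c_rsp := w_rsp
  have c_rbp := w_rbp
  have w_eq : Mem.EqOn Vorbis.L.textLo Vorbis.L.textHi u₀.mem v.mem := hb.frame.code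
  have hdf : v.flags .df = false := (show abiInv _ from hb.frame.inv).1
  have hmx : v.mxcsr &&& 0x1F80 = 0x1F80 := (show abiInv _ from hb.frame.inv).2
  have hsse := Vorbis.sseOK_of_abiInv hb.frame.inv
  have henvR : ReaderEnv A.2 g.frames' (g.Blk A) g.len g.f := readerEnv hb.hand hb.sd.env.live
  have hobjL : LiveIn A.2 g.frames' g.f Off.sizeof.stb_vorbis := hb.hand.obj.mono (sub_frames' g A)
  have w_r13 := hr13
  have hg8' := h_g8 A.2 g.frames' (g.Blk A) g.len
  have hvv' := h_vv A.2 g.frames'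
  u_walk hcode [hμ.vendor] until [Vorbis.L.start_decoder.cut76] span [Vorbis.L.textLo, Vorbis.L.textHi] side (v_side)
  case call_inv =>
    v_inv
  case pre_1141d4 =>
    have hun : ShadowUntouched v.mem s_1141d4.mem := by v_untouched
    have hrsp8 : (s_1141d4.reg .rsp).toNat + 8 = g.R := by
      rw [w_rsp]
      u_omega
    refine ⟨⟨?_, hb.frame.offText⟩, ?_, ?_⟩
    · rw [hrsp8]
      exact hb.frame.shadow.untouched hun
    · rw [w_rdi, ← ef]
      exact henvR
    · rw [w_rdi, ← ef, w_mem]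
      have hlt : (g.e.reg Reg.rsp - 1488).toNat + 8 ≤ 2 ^ 64 := by u_omega
      exact (Reader.store_off_obj hb.sd.bits _ 8 _ hlt (by u_omega)).1.bits
  case call_inv =>
    v_inv
  case pre_114205 =>
    -- vorbis_validate(header): the frame object `header`, the global `vorbis`
    have hun : ShadowUntouched v.mem s_114205.mem := by v_untouched
    have hrsp8 : (s_114205.reg .rsp).toNat + 8 = g.R := by
      rw [w_rsp]
      u_omega
    have hrdi : (s_114205.reg .rdi).toNat = g.base + 80 := by
      rw [w_rdi]
      unfold Ghost.base
      u_omega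
    refine ⟨⟨?_, hb.frame.offText⟩, ?_, ?_⟩
    · rw [hrsp8]
      exact hb.frame.shadow.untouched hun
    · rw [hrdi]
      exact ⟨_, header_obj g A, Nat.le_refl _, Nat.le_refl _⟩
    · exact ⟨_, List.mem_append_right _ hb.hand.g_vorbis, Nat.le_refl _, Nat.le_refl _⟩
  case cont =>
    -- the body: after get8_packet (0x1141d9)
    v_after_call w_rsp_1141d4 w_mem_1141d4
    simp only [w_rdi_1141d4] at w_same
    have hpost1 : Get8PacketPost (g.Blk A) g.len (s_1141d4.reg .rdi).toNat s_1141d4 s_1141d4r := w_post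
    rw [w_rdi_1141d4, ← ef] at hpost1
    obtain ⟨z1, w_rax⟩ : ∃ z, s_1141d4r.reg .rax = z := ⟨_, rfl⟩
    have hun1 : ShadowUntouched v.mem s_1141d4r.mem := by v_untouched
    have hsame1 : Mem.SameExcept
        [⟨(g.e.reg .rsp).toNat - 1888, (g.e.reg .rsp).toNat - 1480⟩,
       ⟨(g.e.reg .rsp).toNat - 1320, (g.e.reg .rsp).toNat - 1314⟩,
       ⟨(g.e.reg .rdi).toNat + 48, (g.e.reg .rdi).toNat + 56⟩, ⟨(g.e.reg .rdi).toNat + 84, (g.e.reg .rdi).toNat + 96⟩,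
       ⟨(g.e.reg .rdi).toNat + 136, (g.e.reg .rdi).toNat + 144⟩, ⟨(g.e.reg .rdi).toNat + 1484, (g.e.reg .rdi).toNat + 1749⟩,
       ⟨(g.e.reg .rdi).toNat + 1752, (g.e.reg .rdi).toNat + 1784⟩,
       ⟨0x121c00, 0x121c00 + 1024⟩] v.mem s_1141d4r.mem := by
      u_same
    have hbits1 : Bits (g.Blk A) g.len s_1141d4r.mem g.f := hpost1.reader.bits
    have hi5 : i ≤ 5 := by
      have := counter_toInt i hi
      rw [this] at hbr_1141fb
      have e5 : (5#32).toInt = 5 := by decide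
      omega
    have w_r13 : s_1141d4r.reg .r13 = UInt64.ofNat i := by
      rw [w_kept .r13 rfl]
      exact hr13
    u_walk hcode [hμ.vendor] until [Vorbis.L.start_decoder.cut76] span [Vorbis.L.textLo, Vorbis.L.textHi] side (v_side)
    case check_1141e6 =>
      -- the store `header[i] = …`: inside the frame object `header`, i ≤ 5
      rw [counter_sext i hi]
      have hun' : ShadowUntouched v.mem s_1141e6.mem := by v_untouched
      refine Vorbis.check_small hb.frame.shadow hun' (header_obj g A) (by decide) ?_ ?_
      · show g.base + 80 ≤ _
        unfold Ghost.base
        u_omega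
      · show _ ≤ g.base + 80 + 6
        unfold Ghost.base
        u_omega
    case side_code =>
      rw [counter_sext i hi]
      u_omega
    -- the back edge: the loop head again, with i + 1
    rw [counter_sext i hi] at w_mem
    refine ReachVia.done (Or.inl ⟨A, i + 1, ?_, by omega, ?_, by omega⟩)
    · have hsameE : Mem.SameExcept
          [⟨(g.e.reg .rsp).toNat - 1888, (g.e.reg .rsp).toNat - 1480⟩,
       ⟨(g.e.reg .rsp).toNat - 1320, (g.e.reg .rsp).toNat - 1314⟩,
       ⟨(g.e.reg .rdi).toNat + 48, (g.e.reg .rdi).toNat + 56⟩, ⟨(g.e.reg .rdi).toNat + 84, (g.e.reg .rdi).toNat + 96⟩,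
       ⟨(g.e.reg .rdi).toNat + 136, (g.e.reg .rdi).toNat + 144⟩, ⟨(g.e.reg .rdi).toNat + 1484, (g.e.reg .rdi).toNat + 1749⟩,
       ⟨(g.e.reg .rdi).toNat + 1752, (g.e.reg .rdi).toNat + 1784⟩,
       ⟨0x121c00, 0x121c00 + 1024⟩] v.mem s_1141f3.mem := by
        rw [w_mem]
        u_same
      have hunE : ShadowUntouched v.mem s_1141f3.mem := by v_untouched
      have hbitsE : Bits (g.Blk A) g.len s_1141f3.mem g.f := by
        rw [w_mem]
        have hlt : (g.e.reg Reg.rsp - 1488).toNat + 8 ≤ 2 ^ 64 := by u_omega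
        have hb1 := (Reader.store_off_obj hbits1 (g.e.reg Reg.rsp - 1488) 8 1130987 hlt (by u_omega)).1.bits
        have hlt2 : (g.e.reg Reg.rsp - 1480 + UInt64.ofNat i + 160).toNat + 1 ≤ 2 ^ 64 := by u_omega
        exact (Reader.store_off_obj hb1 _ 1 _ hlt2 (by u_omega)).1.bits
      have hinvE : abiInv s_1141f3 := by v_inv
      have hrbpE : s_1141f3.reg .rbp = addr g.f := by
        rw [w_kept .rbp rfl]
        exact hb.rbp
      exact mid_exit hb hsameE hunE hbitsE w_rip (by rw [w_rsp]; exact hRw) w_eq hinvE hrbpE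
    · rw [w_r13]
      exact counter_succ i hi5
  -- the exit of the loop: after vorbis_validate (0x11420a)
  v_after_call w_rsp_114205 w_mem_114205
  refine ReachVia.done (Or.inr ⟨A, ?_⟩)
  have hun2 : ShadowUntouched v.mem s_114205r.mem := by v_untouched
  have hsame2 : Mem.SameExcept
      [⟨(g.e.reg .rsp).toNat - 1888, (g.e.reg .rsp).toNat - 1480⟩,
       ⟨(g.e.reg .rsp).toNat - 1320, (g.e.reg .rsp).toNat - 1314⟩,
       ⟨(g.e.reg .rdi).toNat + 48, (g.e.reg .rdi).toNat + 56⟩, ⟨(g.e.reg .rdi).toNat + 84, (g.e.reg .rdi).toNat + 96⟩,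
       ⟨(g.e.reg .rdi).toNat + 136, (g.e.reg .rdi).toNat + 144⟩, ⟨(g.e.reg .rdi).toNat + 1484, (g.e.reg .rdi).toNat + 1749⟩,
       ⟨(g.e.reg .rdi).toNat + 1752, (g.e.reg .rdi).toNat + 1784⟩,
       ⟨0x121c00, 0x121c00 + 1024⟩] v.mem s_114205r.mem := by
    u_same
  have hbits2 : Bits (g.Blk A) g.len s_114205r.mem g.f := by
    have hlt : (g.e.reg Reg.rsp - 1488).toNat + 8 ≤ 2 ^ 64 := by u_omega
    have hb1 := (Reader.store_off_obj hb.sd.bits (g.e.reg Reg.rsp - 1488) 8 1131018 hlt (by u_omega)).1.bits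
    refine bits_off hb1 w_same ?_
    simp only [List.forall_mem_cons, List.not_mem_nil, false_imp_iff, implies_true, and_true]
    u_omega
  have hinv2 : abiInv s_114205r := by v_inv
  have hrbp2 : s_114205r.reg .rbp = addr g.f := by
    rw [w_kept .rbp rfl]
    exact hb.rbp
  exact mid_exit hb hsame2 hun2 hbits2 w_rip (by rw [w_rsp]; exact hRw) w_eq hinv2 hrbp2

end Vorbis.Spec.start_decoder_9c

/-- **Unit `start_decoder.9c`** (one round of loop 3737 or its exit through `vorbis_validate`): the walk `seg9c` above. -/
theorem Vorbis.Spec.Worked.start_decoder_9c_ok : Vorbis.Spec.start_decoder_9c.Statement := by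
  intro Lay hLay μ hμ u₀ hcode h_get8_packet h_asan_store1_noabort h_vorbis_validate g A v i hb hi hr13
  exact Vorbis.Spec.start_decoder_9c.seg9c Lay hLay μ hμ u₀ hcode h_get8_packet h_asan_store1_noabort h_vorbis_validate g A v i hb hi hr13
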